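-- pv_equiv track=rewrite | github.com/jwkice/581-Project_1-MineSweeper-Group1_ForkedbyGroup2forProject2 | minesweeper.py | flagged_neighbors
-- ===== SOURCE A (Python) =====
-- def flagged_neighbors(row, col, flagged, board_rows, board_cols):
--     '''For a given cell (row, col), returns the number of neighboring cells that are flagged'''
--     num_flagged = 0
--     for i in range(-1, 2):
--         if row+i >= 0 and row+i < board_rows:
--             for j in range(-1, 2):
--                 if (col+j >= 0 and col+j < board_cols) and (i != 0 or j != 0):
--                     if (row+i, col+j) in flagged:
--                         num_flagged += 1
--     return num_flagged
-- ===== SOURCE B (Python) =====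
-- def flagged_neighbors(row, col, flagged, board_rows, board_cols):
--     '''For a given cell (row, col), returns the number of neighboring cells that are flagged'''
--     total = 0
--     for (r, c) in set(flagged):
--         if abs(r - row) <= 1 and abs(c - col) <= 1 and (r, c) != (row, col) \
--                 and 0 <= r < board_rows and 0 <= c < board_cols:
--             total += 1
--     return total
-- ===== Notes on version B (the rewrite author's own statement) =====
-- stated objective: alternative
-- what changed: B iterates over the distinct flagged cells and counts those that are in-bounds true neighbors of (row, col), instead of scanning the 3x3 neighborhood and testing each cell for membership in the flagged list.
import Mathlib
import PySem

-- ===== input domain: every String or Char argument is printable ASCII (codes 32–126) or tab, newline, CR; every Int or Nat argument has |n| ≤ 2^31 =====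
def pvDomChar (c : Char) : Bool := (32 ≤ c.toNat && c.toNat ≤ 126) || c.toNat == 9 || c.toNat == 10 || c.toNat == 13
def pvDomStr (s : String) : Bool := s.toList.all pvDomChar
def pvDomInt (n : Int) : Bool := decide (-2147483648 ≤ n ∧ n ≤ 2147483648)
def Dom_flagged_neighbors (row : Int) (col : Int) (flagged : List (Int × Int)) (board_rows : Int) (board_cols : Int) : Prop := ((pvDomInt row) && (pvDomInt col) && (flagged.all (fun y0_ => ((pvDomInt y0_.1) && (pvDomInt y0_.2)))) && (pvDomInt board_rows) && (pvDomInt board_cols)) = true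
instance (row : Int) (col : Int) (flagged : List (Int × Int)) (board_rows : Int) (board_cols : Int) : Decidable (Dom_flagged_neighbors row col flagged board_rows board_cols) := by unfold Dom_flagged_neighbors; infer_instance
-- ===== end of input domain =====

-- B iterates over the distinct flagged cells and counts the in-bounds true neighbors of
-- (row, col), instead of scanning the 3x3 neighborhood and testing list membership (alternative).

-- ===== PORT A =====
def flagged_neighbors (row : Int) (col : Int) (flagged : List (Int × Int)) (board_rows : Int) (board_cols : Int) : Int :=
  (PySem.List.pyRange (-1) 2 1).foldl (fun num_flagged i =>
    if row + i ≥ 0 ∧ row + i < board_rows then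
      (PySem.List.pyRange (-1) 2 1).foldl (fun nf j =>
        if (col + j ≥ 0 ∧ col + j < board_cols) ∧ (i ≠ 0 ∨ j ≠ 0) then
          (if (row + i, col + j) ∈ flagged then nf + 1 else nf)
        else nf) num_flagged
    else num_flagged) 0

-- ===== PORT B =====
def flagged_neighbors_alt (row : Int) (col : Int) (flagged : List (Int × Int)) (board_rows : Int) (board_cols : Int) : Int :=
  (PySem.Set.ofList flagged).foldl (fun total p =>
    if |p.1 - row| ≤ 1 ∧ |p.2 - col| ≤ 1 ∧ p ≠ (row, col) ∧
       0 ≤ p.1 ∧ p.1 < board_rows ∧ 0 ≤ p.2 ∧ p.2 < board_cols then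
      total + 1
    else total) 0

-- ===== PRECONDITION & SPEC =====
def Spec_flagged_neighbors (row : Int) (col : Int) (flagged : List (Int × Int)) (board_rows : Int) (board_cols : Int) (out : Int) : Prop := out = flagged_neighbors_alt row col flagged board_rows board_cols
instance (row : Int) (col : Int) (flagged : List (Int × Int)) (board_rows : Int) (board_cols : Int) (out : Int) : Decidable (Spec_flagged_neighbors row col flagged board_rows board_cols out) := by unfold Spec_flagged_neighbors; infer_instance

-- ===== CLAIM (what is proved, stated in full; the proofs are below) =====
def Claim_equal_flagged_neighbors : Prop := ∀ (row : Int) (col : Int) (flagged : List (Int × Int)) (board_rows : Int) (board_cols : Int), Dom_flagged_neighbors row col flagged board_rows board_cols → Spec_flagged_neighbors row col flagged board_rows board_cols (flagged_neighbors row col flagged board_rows board_cols)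

-- ===== LEMMAS AND PROOFS =====

def pvCells (row col : Int) : List (Int × Int) :=
  [(row + -1, col + -1), (row + -1, col + 0), (row + -1, col + 1),
   (row + 0,  col + -1), (row + 0,  col + 0), (row + 0,  col + 1),
   (row + 1,  col + -1), (row + 1,  col + 0), (row + 1,  col + 1)]

lemma pvIte_distrib (c : Prop) [Decidable c] (x y z : Int) :
    (if c then x + y + z else 0) = (if c then x else 0) + (if c then y else 0) + (if c then z else 0) := by
  split_ifs <;> ring

lemma pvIte_nest (c1 c2 c3 : Prop) [Decidable c1] [Decidable c2] [Decidable c3]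
    (h : c3 ↔ c1 ∧ c2) :
    (if c1 then (if c2 then (1 : Int) else 0) else 0) = if c3 then 1 else 0 := by
  split_ifs <;> tauto

lemma pvRange_m1_2 : PySem.List.pyRange (-1) 2 1 = [-1, 0, 1] := by decide

lemma pvA_eq_countP (row col : Int) (flagged : List (Int × Int)) (br bc : Int) :
    flagged_neighbors row col flagged br bc =
      ((pvCells row col).countP (fun p =>
        decide (((0 ≤ p.1 ∧ p.1 < br ∧ 0 ≤ p.2 ∧ p.2 < bc) ∧ p ≠ (row, col)) ∧ p ∈ flagged)) : Nat) := by
  unfold flagged_neighbors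
  rw [pvRange_m1_2]
  have houter : ∀ (acc : Int) (i : Int), i ∈ ([-1, 0, 1] : List Int) →
      (if row + i ≥ 0 ∧ row + i < br then
        ([-1, 0, 1] : List Int).foldl (fun nf j =>
          if (col + j ≥ 0 ∧ col + j < bc) ∧ (i ≠ 0 ∨ j ≠ 0) then
            (if (row + i, col + j) ∈ flagged then nf + 1 else nf)
          else nf) acc
      else acc)
      = acc + (if row + i ≥ 0 ∧ row + i < br then
          (([-1, 0, 1] : List Int).countP (fun j =>
            decide (((col + j ≥ 0 ∧ col + j < bc) ∧ (i ≠ 0 ∨ j ≠ 0)) ∧ (row + i, col + j) ∈ flagged)) : Int)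
        else 0) := by
    intro acc i _
    have hbody : ∀ (nf : Int) (j : Int), j ∈ ([-1, 0, 1] : List Int) →
        (if (col + j ≥ 0 ∧ col + j < bc) ∧ (i ≠ 0 ∨ j ≠ 0) then
          (if (row + i, col + j) ∈ flagged then nf + 1 else nf)
        else nf)
        = (if (((col + j ≥ 0 ∧ col + j < bc) ∧ (i ≠ 0 ∨ j ≠ 0)) ∧ (row + i, col + j) ∈ flagged) then nf + 1 else nf) := by
      intro nf j _; split_ifs <;> tauto
    rw [PySem.List.foldl_congr_mem _ _ _ _ hbody, PySem.List.foldl_ite_add_one]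
    split_ifs <;> simp
  rw [PySem.List.foldl_congr_mem _ _ _ _ houter, PySem.List.foldl_add]
  simp only [List.map_cons, List.map_nil, List.sum_cons, List.sum_nil, List.countP_cons,
    List.countP_nil, pvCells, decide_eq_true_eq, zero_add, add_zero]
  push_cast
  rw [pvIte_distrib, pvIte_distrib, pvIte_distrib]
  have t_m1_1 : (if row + -1 ≥ 0 ∧ row + -1 < br then (if ((col + 1 ≥ 0 ∧ col + 1 < bc) ∧ (True ∨ True)) ∧ (row + -1, col + 1) ∈ flagged then (1 : Int) else 0) else 0) = (if ((0 ≤ row + -1 ∧ row + -1 < br ∧ 0 ≤ col + 1 ∧ col + 1 < bc) ∧ ((row + -1, col + 1) : Int × Int) ≠ (row, col)) ∧ (row + -1, col + 1) ∈ flagged then (1 : Int) else 0) :=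
    pvIte_nest _ _ _ (by by_cases hM : ((row + -1, col + 1) : Int × Int) ∈ flagged <;> simp [hM, Prod.ext_iff] <;> omega)
  have t_m1_0 : (if row + -1 ≥ 0 ∧ row + -1 < br then (if ((col ≥ 0 ∧ col < bc) ∧ (True ∨ False)) ∧ (row + -1, col) ∈ flagged then (1 : Int) else 0) else 0) = (if ((0 ≤ row + -1 ∧ row + -1 < br ∧ 0 ≤ col ∧ col < bc) ∧ ((row + -1, col) : Int × Int) ≠ (row, col)) ∧ (row + -1, col) ∈ flagged then (1 : Int) else 0) :=
    pvIte_nest _ _ _ (by by_cases hM : ((row + -1, col) : Int × Int) ∈ flagged <;> simp [hM, Prod.ext_iff] <;> omega)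
  have t_m1_m1 : (if row + -1 ≥ 0 ∧ row + -1 < br then (if ((col + -1 ≥ 0 ∧ col + -1 < bc) ∧ (True ∨ True)) ∧ (row + -1, col + -1) ∈ flagged then (1 : Int) else 0) else 0) = (if ((0 ≤ row + -1 ∧ row + -1 < br ∧ 0 ≤ col + -1 ∧ col + -1 < bc) ∧ ((row + -1, col + -1) : Int × Int) ≠ (row, col)) ∧ (row + -1, col + -1) ∈ flagged then (1 : Int) else 0) :=
    pvIte_nest _ _ _ (by by_cases hM : ((row + -1, col + -1) : Int × Int) ∈ flagged <;> simp [hM, Prod.ext_iff] <;> omega)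
  have t_0_1 : (if row ≥ 0 ∧ row < br then (if ((col + 1 ≥ 0 ∧ col + 1 < bc) ∧ (False ∨ True)) ∧ (row, col + 1) ∈ flagged then (1 : Int) else 0) else 0) = (if ((0 ≤ row ∧ row < br ∧ 0 ≤ col + 1 ∧ col + 1 < bc) ∧ ((row, col + 1) : Int × Int) ≠ (row, col)) ∧ (row, col + 1) ∈ flagged then (1 : Int) else 0) :=
    pvIte_nest _ _ _ (by by_cases hM : ((row, col + 1) : Int × Int) ∈ flagged <;> simp [hM, Prod.ext_iff] <;> omega)
  have t_0_0 : (if row ≥ 0 ∧ row < br then (if ((col ≥ 0 ∧ col < bc) ∧ (False ∨ False)) ∧ (row, col) ∈ flagged then (1 : Int) else 0) else 0) = (if ((0 ≤ row ∧ row < br ∧ 0 ≤ col ∧ col < bc) ∧ ((row, col) : Int × Int) ≠ (row, col)) ∧ (row, col) ∈ flagged then (1 : Int) else 0) :=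
    pvIte_nest _ _ _ (by simp)
  have t_0_m1 : (if row ≥ 0 ∧ row < br then (if ((col + -1 ≥ 0 ∧ col + -1 < bc) ∧ (False ∨ True)) ∧ (row, col + -1) ∈ flagged then (1 : Int) else 0) else 0) = (if ((0 ≤ row ∧ row < br ∧ 0 ≤ col + -1 ∧ col + -1 < bc) ∧ ((row, col + -1) : Int × Int) ≠ (row, col)) ∧ (row, col + -1) ∈ flagged then (1 : Int) else 0) :=
    pvIte_nest _ _ _ (by by_cases hM : ((row, col + -1) : Int × Int) ∈ flagged <;> simp [hM, Prod.ext_iff] <;> omega)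
  have t_1_1 : (if row + 1 ≥ 0 ∧ row + 1 < br then (if ((col + 1 ≥ 0 ∧ col + 1 < bc) ∧ (True ∨ True)) ∧ (row + 1, col + 1) ∈ flagged then (1 : Int) else 0) else 0) = (if ((0 ≤ row + 1 ∧ row + 1 < br ∧ 0 ≤ col + 1 ∧ col + 1 < bc) ∧ ((row + 1, col + 1) : Int × Int) ≠ (row, col)) ∧ (row + 1, col + 1) ∈ flagged then (1 : Int) else 0) :=
    pvIte_nest _ _ _ (by by_cases hM : ((row + 1, col + 1) : Int × Int) ∈ flagged <;> simp [hM, Prod.ext_iff] <;> omega)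
  have t_1_0 : (if row + 1 ≥ 0 ∧ row + 1 < br then (if ((col ≥ 0 ∧ col < bc) ∧ (True ∨ False)) ∧ (row + 1, col) ∈ flagged then (1 : Int) else 0) else 0) = (if ((0 ≤ row + 1 ∧ row + 1 < br ∧ 0 ≤ col ∧ col < bc) ∧ ((row + 1, col) : Int × Int) ≠ (row, col)) ∧ (row + 1, col) ∈ flagged then (1 : Int) else 0) :=
    pvIte_nest _ _ _ (by by_cases hM : ((row + 1, col) : Int × Int) ∈ flagged <;> simp [hM, Prod.ext_iff] <;> omega)
  have t_1_m1 : (if row + 1 ≥ 0 ∧ row + 1 < br then (if ((col + -1 ≥ 0 ∧ col + -1 < bc) ∧ (True ∨ True)) ∧ (row + 1, col + -1) ∈ flagged then (1 : Int) else 0) else 0) = (if ((0 ≤ row + 1 ∧ row + 1 < br ∧ 0 ≤ col + -1 ∧ col + -1 < bc) ∧ ((row + 1, col + -1) : Int × Int) ≠ (row, col)) ∧ (row + 1, col + -1) ∈ flagged then (1 : Int) else 0) :=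
    pvIte_nest _ _ _ (by by_cases hM : ((row + 1, col + -1) : Int × Int) ∈ flagged <;> simp [hM, Prod.ext_iff] <;> omega)
  rw [t_m1_1, t_m1_0, t_m1_m1, t_0_1, t_0_0, t_0_m1, t_1_1, t_1_0, t_1_m1]
  ring


lemma pvCells_nodup (row col : Int) : (pvCells row col).Nodup := by
  simp [pvCells, Prod.ext_iff]

-- Counting the elements of a nodup candidate list that lie in a nodup list S
-- equals counting the elements of S that lie in the candidate list.
lemma pvCount_swap (C S : List (Int × Int)) (R : Int × Int → Prop) [DecidablePred R]
    (hC : C.Nodup) (hS : S.Nodup) :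
    C.countP (fun p => decide (R p ∧ p ∈ S)) = S.countP (fun p => decide (R p ∧ p ∈ C)) := by
  rw [List.countP_eq_length_filter, List.countP_eq_length_filter]
  apply List.Perm.length_eq
  rw [List.perm_ext_iff_of_nodup (hC.filter _) (hS.filter _)]
  intro a
  simp only [List.mem_filter, decide_eq_true_eq]
  tauto

-- B counts, over the distinct flagged cells, those that are in-bounds true neighbors.
lemma pvB_eq_countP (row col : Int) (flagged : List (Int × Int)) (br bc : Int) :
    flagged_neighbors_alt row col flagged br bc =
      (((PySem.Set.ofList flagged).countP (fun p =>
        decide (((0 ≤ p.1 ∧ p.1 < br ∧ 0 ≤ p.2 ∧ p.2 < bc) ∧ p ≠ (row, col)) ∧ p ∈ pvCells row col))) : Nat) := by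
  unfold flagged_neighbors_alt
  rw [PySem.List.foldl_ite_add_one]
  have h : ∀ p ∈ PySem.Set.ofList flagged,
      (decide (|p.1 - row| ≤ 1 ∧ |p.2 - col| ≤ 1 ∧ p ≠ (row, col) ∧
        0 ≤ p.1 ∧ p.1 < br ∧ 0 ≤ p.2 ∧ p.2 < bc) = true)
      ↔ (decide (((0 ≤ p.1 ∧ p.1 < br ∧ 0 ≤ p.2 ∧ p.2 < bc) ∧ p ≠ (row, col)) ∧ p ∈ pvCells row col) = true) := by
    intro p _
    rcases p with ⟨a, b⟩
    simp only [decide_eq_true_eq, pvCells, List.mem_cons, List.not_mem_nil, or_false,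
      Prod.mk.injEq, ne_eq, abs_le]
    omega
  rw [List.countP_congr h]
  simp

theorem flagged_neighbors_spec : Claim_equal_flagged_neighbors := by
  intro row col flagged br bc _
  unfold Spec_flagged_neighbors
  rw [pvA_eq_countP, pvB_eq_countP]
  have hmem : ∀ p ∈ pvCells row col,
      (decide (((0 ≤ p.1 ∧ p.1 < br ∧ 0 ≤ p.2 ∧ p.2 < bc) ∧ p ≠ (row, col)) ∧ p ∈ flagged) = true)
      ↔ (decide (((0 ≤ p.1 ∧ p.1 < br ∧ 0 ≤ p.2 ∧ p.2 < bc) ∧ p ≠ (row, col)) ∧ p ∈ PySem.Set.ofList flagged) = true) := by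
    intro p _
    simp [PySem.Set.mem_ofList]
  rw [List.countP_congr hmem]
  exact congrArg (fun n : Nat => (n : Int))
    (pvCount_swap (pvCells row col) (PySem.Set.ofList flagged)
      (fun p => ((0 ≤ p.1 ∧ p.1 < br ∧ 0 ≤ p.2 ∧ p.2 < bc) ∧ p ≠ (row, col)))
      (pvCells_nodup row col) (PySem.Set.nodup_ofList flagged))
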